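-- pv_equiv track=rewrite | github.com/kinda-debug/tagslut | tagslut/cli/commands/ops.py | _parse_doctor_counts
-- ===== SOURCE A (Python) =====
-- _DOCTOR_COUNT_KEYS = (
--     "asset_file_total",
--     "asset_link_total",
--     "track_identity_total",
--     "integrity_done",
--     "sha256_done",
--     "enriched_done",
-- )
--
-- def _parse_doctor_counts(stdout: str, stderr: str) -> dict[str, int]:
--     merged = "\n".join(part for part in (stdout, stderr) if part)
--     counts = {key: 0 for key in _DOCTOR_COUNT_KEYS}
--     for line in merged.splitlines():
--         if ":" not in line:
--             continue
--         key, raw_value = line.split(":", 1)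
--         parsed_key = key.strip()
--         if parsed_key not in counts:
--             continue
--         try:
--             counts[parsed_key] = int(raw_value.strip())
--         except ValueError:
--             continue
--     return counts
-- ===== SOURCE B (Python) =====
-- _DOCTOR_COUNT_KEYS = (
--     "asset_file_total",
--     "asset_link_total",
--     "track_identity_total",
--     "integrity_done",
--     "sha256_done",
--     "enriched_done",
-- )
--
--
-- def _last_count(key, rlines):
--     # first valid "key: int" hit while scanning backwards == last one forwards
--     for line in rlines:
--         parts = line.split(":", 1)
--         if len(parts) == 2 and parts[0].strip() == key:
--             try:
--                 return int(parts[1].strip())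
--             except ValueError:
--                 continue
--     return 0
--
--
-- def _parse_doctor_counts(stdout: str, stderr: str) -> dict[str, int]:
--     merged = "\n".join(part for part in (stdout, stderr) if part)
--     rlines = list(reversed(merged.splitlines()))
--     return {key: _last_count(key, rlines) for key in _DOCTOR_COUNT_KEYS}
-- ===== Notes on version B (the rewrite author's own statement) =====
-- stated objective: alternative
-- what changed: B drops the dict entirely: for each of the six known keys it scans the lines in reverse and returns the first line that parses as 'key: int' (equal to A's last-write-wins), defaulting to 0 — an outer loop over keys with an early-exit backward search instead of A's single forward pass mutating a pre-initialized dict.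
import Mathlib
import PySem

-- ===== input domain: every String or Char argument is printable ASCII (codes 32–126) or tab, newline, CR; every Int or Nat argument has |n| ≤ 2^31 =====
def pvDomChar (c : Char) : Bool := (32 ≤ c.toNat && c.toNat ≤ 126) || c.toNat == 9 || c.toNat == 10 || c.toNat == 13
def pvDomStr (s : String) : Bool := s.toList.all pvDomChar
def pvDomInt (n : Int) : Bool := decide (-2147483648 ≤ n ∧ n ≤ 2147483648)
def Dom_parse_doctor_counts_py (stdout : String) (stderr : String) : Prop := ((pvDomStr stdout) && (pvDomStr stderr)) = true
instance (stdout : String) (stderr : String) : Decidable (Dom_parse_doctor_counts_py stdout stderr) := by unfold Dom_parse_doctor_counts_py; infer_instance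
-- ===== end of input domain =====

-- B drops the dict: for each of the six keys it scans the lines backwards and returns the first
-- line parsing as "key: int" (= A's last write), defaulting to 0 (objective: alternative algorithm).

-- ===== PORT A =====
-- the module-level constant _DOCTOR_COUNT_KEYS
def pvDoctorCountKeysA : List String :=
  ["asset_file_total", "asset_link_total", "track_identity_total",
   "integrity_done", "sha256_done", "enriched_done"]

def parse_doctor_counts_py (stdout : String) (stderr : String) : List (String × Int) :=
  let merged := PySem.Str.join "\n" ([stdout, stderr].filter (fun part => !(part == "")))
  let counts0 : PySem.Dict String Int :=
    pvDoctorCountKeysA.foldl (fun d key => d.insert key 0) PySem.Dict.empty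
  let counts := (PySem.Str.splitlines merged).foldl (fun counts line =>
    if !(PySem.Str.isIn ":" line) then counts          -- if ":" not in line: continue
    else match PySem.Str.splitMax? line ":" 1 with     -- key, raw_value = line.split(":", 1)
      | some [key, raw_value] =>
        let parsed_key := PySem.Str.strip key
        if !(counts.contains parsed_key) then counts   -- if parsed_key not in counts: continue
        else match PySem.Int.ofStr? (PySem.Str.strip raw_value) with
          | some n => counts.insert parsed_key n       -- counts[parsed_key] = int(...)
          | none => counts                             -- except ValueError: continue
      | _ => counts                                    -- unreachable: ":" in line gives 2 parts
    ) counts0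
  counts.items

-- ===== PORT B =====
-- the module-level constant _DOCTOR_COUNT_KEYS (B's own copy)
def pvDoctorCountKeysB : List String :=
  ["asset_file_total", "asset_link_total", "track_identity_total",
   "integrity_done", "sha256_done", "enriched_done"]

-- _last_count: first valid "key: int" hit while scanning backwards
def pvLastCount (key : String) (rlines : List String) : Int :=
  match rlines with
  | [] => 0
  | line :: rest =>
    let parts := (PySem.Str.splitMax? line ":" 1).getD []   -- parts = line.split(":", 1); sep ≠ "" so never none
    if parts.length == 2 && (PySem.Str.strip (parts.getD 0 "") == key) then
      -- try: return int(parts[1].strip())  except ValueError: continue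
      (PySem.Int.ofStr? (PySem.Str.strip (parts.getD 1 ""))).elim (pvLastCount key rest) (fun n => n)
    else pvLastCount key rest

def parse_doctor_counts_py_alt (stdout : String) (stderr : String) : List (String × Int) :=
  let merged := PySem.Str.join "\n" ([stdout, stderr].filter (fun part => !(part == "")))
  let rlines := (PySem.Str.splitlines merged).reverse
  pvDoctorCountKeysB.map (fun key => (key, pvLastCount key rlines))

-- ===== PRECONDITION & SPEC =====
def Spec_parse_doctor_counts_py (stdout : String) (stderr : String) (out : List (String × Int)) : Prop := out = parse_doctor_counts_py_alt stdout stderr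
instance (stdout : String) (stderr : String) (out : List (String × Int)) : Decidable (Spec_parse_doctor_counts_py stdout stderr out) := by unfold Spec_parse_doctor_counts_py; infer_instance

-- ===== CLAIM =====
def Claim_equal_parse_doctor_counts_py : Prop := ∀ (stdout : String) (stderr : String), Dom_parse_doctor_counts_py stdout stderr → Spec_parse_doctor_counts_py stdout stderr (parse_doctor_counts_py stdout stderr)

-- ===== LEMMAS AND PROOFS =====

-- the (key, value) a line contributes, if any: 2 parts and the value parses
def pvStepVal (line : String) : Option (String × Int) :=
  let parts := (PySem.Str.splitMax? line ":" 1).getD []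
  if parts.length == 2 then
    (PySem.Int.ofStr? (PySem.Str.strip (parts.getD 1 ""))).map
      (fun n => (PySem.Str.strip (parts.getD 0 ""), n))
  else none

-- option-valued backward search (pvLastCount without the default; same case structure)
def pvFind? (key : String) (rlines : List String) : Option Int :=
  match rlines with
  | [] => none
  | line :: rest =>
    let parts := (PySem.Str.splitMax? line ":" 1).getD []
    if parts.length == 2 && (PySem.Str.strip (parts.getD 0 "") == key) then
      (PySem.Int.ofStr? (PySem.Str.strip (parts.getD 1 ""))).elim (pvFind? key rest) some
    else pvFind? key rest

set_option maxHeartbeats 1000000 in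
lemma pvLastCount_eq_find (key : String) (rl : List String) :
    pvLastCount key rl = (pvFind? key rl).getD 0 := by
  induction rl with
  | nil => rfl
  | cons l rest ih =>
    simp only [pvLastCount, pvFind?]
    cases hc : (((PySem.Str.splitMax? l ":" 1).getD []).length == 2 &&
        (PySem.Str.strip (((PySem.Str.splitMax? l ":" 1).getD []).getD 0 "") == key))
    · simp only [hc, Bool.false_eq_true, if_false]; exact ih
    · simp only [hc, if_true]
      rcases PySem.Int.ofStr? (PySem.Str.strip (((PySem.Str.splitMax? l ":" 1).getD []).getD 1 "")) with _ | n <;>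
        simp [ih]

set_option maxHeartbeats 1000000 in
lemma pvFind?_single (key l : String) :
    pvFind? key [l]
      = (pvStepVal l).bind (fun p => if key = p.1 then some p.2 else none) := by
  simp only [pvFind?, pvStepVal]
  cases hl : (((PySem.Str.splitMax? l ":" 1).getD []).length == 2)
  · simp only [hl, Bool.false_and, Bool.false_eq_true, if_false, Option.bind_none, pvFind?]
  · cases hk : (PySem.Str.strip (((PySem.Str.splitMax? l ":" 1).getD []).getD 0 "") == key)
    · have hne : ¬ (key = PySem.Str.strip (((PySem.Str.splitMax? l ":" 1).getD []).getD 0 "")) := by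
        intro he; rw [he] at hk; simp at hk
      rcases hn : PySem.Int.ofStr? (PySem.Str.strip (((PySem.Str.splitMax? l ":" 1).getD []).getD 1 "")) with _ | n
      · simp only [hl, hk, hn, Bool.true_and, Bool.false_eq_true, if_false, if_true,
          Option.map_none, Option.bind_none, pvFind?]
      · simp only [hl, hk, hn, Bool.true_and, Bool.false_eq_true, if_false, if_true,
          Option.map_some, Option.bind_some, pvFind?]
        rw [if_neg hne]
    · have he : key = PySem.Str.strip (((PySem.Str.splitMax? l ":" 1).getD []).getD 0 "") :=
        (beq_iff_eq.mp hk).symm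
      rcases hn : PySem.Int.ofStr? (PySem.Str.strip (((PySem.Str.splitMax? l ":" 1).getD []).getD 1 "")) with _ | n
      · simp only [hl, hk, hn, Bool.true_and, if_true,
          Option.map_none, Option.bind_none, Option.elim_none, pvFind?]
      · simp only [hl, hk, hn, Bool.true_and, if_true,
          Option.map_some, Option.bind_some, Option.elim_some, pvFind?]
        rw [if_pos he]

set_option maxHeartbeats 1000000 in
lemma pvFind?_append (key : String) (xs ys : List String) :
    pvFind? key (xs ++ ys) = (pvFind? key xs).or (pvFind? key ys) := by
  induction xs with
  | nil => rfl
  | cons l rest ih =>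
    simp only [List.cons_append, pvFind?]
    cases hc : (((PySem.Str.splitMax? l ":" 1).getD []).length == 2 &&
        (PySem.Str.strip (((PySem.Str.splitMax? l ":" 1).getD []).getD 0 "") == key))
    · simp only [hc, Bool.false_eq_true, if_false]; exact ih
    · simp only [hc, if_true]
      rcases PySem.Int.ofStr? (PySem.Str.strip (((PySem.Str.splitMax? l ":" 1).getD []).getD 1 "")) with _ | n <;>
        simp [ih]

-- if the separator char is absent, splitOnMax with fuel returns the whole input as one piece
lemma pv_go_no_sep (c : Char) (fuel m : Nat) (l cur : List Char) (acc : List (List Char))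
    (h : c ∉ l) :
    PySem.Chars.splitOnMax.go [c] fuel m l cur acc = ((cur.reverse ++ l) :: acc).reverse := by
  induction fuel generalizing l cur acc with
  | zero => simp [PySem.Chars.splitOnMax.go]
  | succ fuel ih =>
    cases l with
    | nil => simp [PySem.Chars.splitOnMax.go]
    | cons x rest =>
      have hxc : ¬ (x = c) := fun hx => h (hx ▸ List.mem_cons_self)
      have hpre : [c].isPrefixOf (x :: rest) = false := by
        simp [List.isPrefixOf]; exact fun hx => hxc hx.symm
      simp only [PySem.Chars.splitOnMax.go, hpre]
      by_cases hm : m = 0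
      · simp [hm]
      · simp only [hm, if_false]
        rw [ih rest (x :: cur) acc (fun hx => h (List.mem_cons_of_mem _ hx))]
        simp

lemma pv_splitMax_no_colon (line : String) (h : PySem.Str.isIn ":" line = false) :
    PySem.Str.splitMax? line ":" 1 = some [line] := by
  have hmem : ':' ∉ line.toList := by
    intro hmem
    obtain ⟨l1, l2, hl⟩ := List.append_of_mem hmem
    have : PySem.Str.isIn ":" line = true := by
      rw [PySem.Str.isIn_iff_infix]
      exact ⟨l1, l2, by simp [hl]⟩
    rw [this] at h; exact Bool.noConfusion h
  unfold PySem.Str.splitMax? PySem.Chars.splitMax? PySem.Chars.splitOnMax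
  rw [if_neg (by simp)]
  norm_num
  have hsep : (":".toList) = [':'] := rfl
  rw [hsep, pv_go_no_sep ':' _ _ _ _ _ hmem]
  exact ⟨line.toList, by simp, by simp⟩

-- the effect of line l on the pointwise value function
def pvUpd (l : String) (g : String → Int) : String → Int := fun k =>
  (pvStepVal l).elim (g k) (fun p => if k = p.1 then p.2 else g k)

set_option maxHeartbeats 1000000 in
lemma pv_step (d : PySem.Dict String Int) (g : String → Int) (l : String)
    (hinv : d.items = pvDoctorCountKeysB.map (fun k => (k, g k))) :
    (if !(PySem.Str.isIn ":" l) then d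
      else match PySem.Str.splitMax? l ":" 1 with
        | some [key, raw_value] =>
          let parsed_key := PySem.Str.strip key
          if !(d.contains parsed_key) then d
          else match PySem.Int.ofStr? (PySem.Str.strip raw_value) with
            | some n => d.insert parsed_key n
            | none => d
        | _ => d).items = pvDoctorCountKeysB.map (fun k => (k, pvUpd l g k)) := by
  have hkeys : d.keys = pvDoctorCountKeysB := by
    rw [show d.keys = d.items.map (fun x => x.1) from rfl, hinv, List.map_map]
    exact (List.map_congr_left (fun a _ => rfl)).trans (List.map_id _)
  by_cases hc : PySem.Str.isIn ":" l = false
  · -- no colon: A skips the line, and pvStepVal l = none since split yields one part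
    rw [hc]
    have hsv : pvStepVal l = none := by
      simp [pvStepVal, pv_splitMax_no_colon l hc]
    simp only [pvUpd, hsv, Option.elim_none, Bool.not_false, if_true]
    exact hinv
  · rw [Bool.not_eq_false] at hc
    rw [hc]
    simp only [Bool.not_true, Bool.false_eq_true, if_false]
    rcases hps : PySem.Str.splitMax? l ":" 1 with _ | ⟨_ | ⟨k, _ | ⟨v, _ | _⟩⟩⟩ <;>
      try (have hsv : pvStepVal l = none := by simp [pvStepVal, hps];
           simp only [pvUpd, hsv, Option.elim_none]; exact hinv)
    -- the two-part case
    rcases hn : PySem.Int.ofStr? (PySem.Str.strip v) with _ | n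
    · have hsv : pvStepVal l = none := by simp [pvStepVal, hps, hn]
      simp only [pvUpd, hsv, Option.elim_none, hn]
      split_ifs <;> exact hinv
    · have hsv : pvStepVal l = some (PySem.Str.strip k, n) := by
        simp [pvStepVal, hps, hn]
      simp only [pvUpd, hsv, Option.elim_some, hn]
      split_ifs with hif
      · -- key not among the six: A skips, and pvUpd's branch never fires for keys of the list
        have hmemk : PySem.Str.strip k ∉ pvDoctorCountKeysB := by
          have hce := PySem.Dict.contains_eq_decide_mem_keys d (PySem.Str.strip k)
          rw [hkeys] at hce
          intro hm
          rw [hce] at hif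
          simp [hm] at hif
        rw [hinv]
        refine List.map_congr_left (fun key hkey => ?_)
        have hk : key ≠ PySem.Str.strip k := fun h => hmemk (h ▸ hkey)
        simp [hk]
      · -- key is one of the six: both sides store n there
        have hcont : d.contains (PySem.Str.strip k) = true := by
          revert hif; cases d.contains (PySem.Str.strip k) <;> simp
        rw [PySem.Dict.items_insert_of_contains _ _ hcont, hinv, List.map_map]
        refine List.map_congr_left (fun key _ => ?_)
        by_cases hk : key = PySem.Str.strip k <;> simp [hk]

set_option maxHeartbeats 1000000 in
lemma pv_fold (lines : List String) (d : PySem.Dict String Int) (g : String → Int)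
    (hinv : d.items = pvDoctorCountKeysB.map (fun k => (k, g k))) :
    (lines.foldl (fun counts line =>
      if !(PySem.Str.isIn ":" line) then counts
      else match PySem.Str.splitMax? line ":" 1 with
        | some [key, raw_value] =>
          let parsed_key := PySem.Str.strip key
          if !(counts.contains parsed_key) then counts
          else match PySem.Int.ofStr? (PySem.Str.strip raw_value) with
            | some n => counts.insert parsed_key n
            | none => counts
        | _ => counts) d).items
    = pvDoctorCountKeysB.map (fun k => (k, (pvFind? k lines.reverse).getD (g k))) := by
  induction lines generalizing d g with
  | nil => simpa [pvFind?] using hinv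
  | cons l ls ih =>
    simp only [List.foldl_cons]
    rw [ih _ (pvUpd l g) (pv_step d g l hinv)]
    refine List.map_congr_left (fun key _ => ?_)
    have hrev : (l :: ls).reverse = ls.reverse ++ [l] := by simp
    rw [hrev, pvFind?_append, pvFind?_single]
    rcases hsv : pvStepVal l with _ | ⟨k0, n⟩
    · simp [pvUpd, hsv]
    · by_cases hk : key = k0 <;>
        rcases hf : pvFind? key ls.reverse with _ | m <;>
        simp [pvUpd, hsv, hk, hf]

-- ===== VERDICT =====
theorem parse_doctor_counts_py_spec : Claim_equal_parse_doctor_counts_py := by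
  intro stdout stderr _
  unfold Spec_parse_doctor_counts_py parse_doctor_counts_py parse_doctor_counts_py_alt
  rw [pv_fold _ _ (fun _ => 0) (by decide)]
  exact List.map_congr_left (fun key _ => by rw [pvLastCount_eq_find])
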